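-- pv_equiv track=rewrite | github.com/farzan-dehbashi/toolkit | questions/most_positive.py | getRowIndexWithMostPositiveNumbers
-- ===== SOURCE A (Python) =====
-- def getRowIndexWithMostPositiveNumbers(matrix):
-- # Write your code here
--     max_pos_num = 0
--     index = None
--     for row in matrix:
--         pos_count = 0
--         for item in row:
--             if item > 0:
--                 pos_count += 1
--         if pos_count > max_pos_num:
--             max_pos_num = pos_count
--             index = matrix.index(row)
--     return index
-- ===== SOURCE B (Python) =====
-- def getRowIndexWithMostPositiveNumbers(matrix):
--     # Materialize the per-row positive counts, then reduce twice: max, then first index.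
--     counts = [len([x for x in row if x > 0]) for row in matrix]
--     if not counts:
--         return None
--     m = max(counts)
--     return None if m == 0 else counts.index(m)
-- ===== Notes on version B (the rewrite author's own statement) =====
-- stated objective: simpler
-- what changed: Replaces A's fused running-max loop with matrix.index lookups by a materialized per-row counts table followed by two library reductions: max, then counts.index of that max (None if the max is 0 or the matrix is empty).
import Mathlib
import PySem

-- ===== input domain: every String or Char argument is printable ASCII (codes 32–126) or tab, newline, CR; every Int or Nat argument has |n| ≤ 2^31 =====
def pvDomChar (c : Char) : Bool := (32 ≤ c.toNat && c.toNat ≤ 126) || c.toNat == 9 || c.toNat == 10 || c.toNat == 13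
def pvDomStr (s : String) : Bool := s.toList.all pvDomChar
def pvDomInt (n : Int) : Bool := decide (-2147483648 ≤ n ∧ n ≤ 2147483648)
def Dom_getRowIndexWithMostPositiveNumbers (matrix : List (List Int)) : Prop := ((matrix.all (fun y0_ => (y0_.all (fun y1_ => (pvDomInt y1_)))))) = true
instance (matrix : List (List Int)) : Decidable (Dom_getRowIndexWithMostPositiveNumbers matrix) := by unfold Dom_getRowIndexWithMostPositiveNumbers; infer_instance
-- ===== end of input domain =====

-- B replaces A's fused running-max loop (with matrix.index rescans) by a counts table plus two reductions (max, then index); objective: simpler.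


-- ===== PORT A =====
def getRowIndexWithMostPositiveNumbers (matrix : List (List Int)) : Option Int :=
  (matrix.foldl
    (fun (st : Int × Option Int) row =>
      let pos_count := row.foldl (fun c item => if item > 0 then c + 1 else c) (0 : Int)
      if pos_count > st.1 then
        (pos_count, (PySem.List.index? matrix row).map (fun n => (n : Int)))
      else st)
    (0, none)).2

-- ===== PORT B =====
def getRowIndexWithMostPositiveNumbers_alt (matrix : List (List Int)) : Option Int :=
  let counts := matrix.map (fun row => ((row.filter (fun x => decide (x > 0))).length : Int))
  match PySem.List.max? counts (fun x => x) with
  | none => none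
  | some m => if m = 0 then none else (PySem.List.index? counts m).map (fun n => (n : Int))

-- ===== PRECONDITION & SPEC =====
def Spec_getRowIndexWithMostPositiveNumbers (matrix : List (List Int)) (out : Option Int) : Prop := out = getRowIndexWithMostPositiveNumbers_alt matrix
instance (matrix : List (List Int)) (out : Option Int) : Decidable (Spec_getRowIndexWithMostPositiveNumbers matrix out) := by unfold Spec_getRowIndexWithMostPositiveNumbers; infer_instance

-- ===== CLAIM (what is proved, stated in full; the proofs are below) =====
def Claim_equal_getRowIndexWithMostPositiveNumbers : Prop := ∀ (matrix : List (List Int)), Dom_getRowIndexWithMostPositiveNumbers matrix → Spec_getRowIndexWithMostPositiveNumbers matrix (getRowIndexWithMostPositiveNumbers matrix)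

-- ===== LEMMAS AND PROOFS =====

/-- Positive count of a row, as an Int. -/
def pvCnt (row : List Int) : Int := ((row.filter (fun x => decide (x > 0))).length : Int)

/-- Running max of positive counts over a prefix. -/
def pvMaxc (q : List (List Int)) : Int := (q.map pvCnt).foldl max 0

/-- The loop state A maintains after processing prefix `q` of `m`. -/
def pvState (m q : List (List Int)) : Int × Option Int :=
  (pvMaxc q,
   if pvMaxc q = 0 then none
   else (PySem.List.index? (m.map pvCnt) (pvMaxc q)).map (fun n => (n : Int)))

theorem pvCnt_foldl (row : List Int) (c0 : Int) :
    row.foldl (fun c item => if item > 0 then c + 1 else c) c0 = c0 + pvCnt row := by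
  induction row generalizing c0 with
  | nil => simp [pvCnt]
  | cons x t ih =>
    by_cases h : x > 0 <;> simp [pvCnt, h, ih] <;> ring

theorem pvCnt_nonneg (row : List Int) : 0 ≤ pvCnt row := by
  simp [pvCnt]

theorem pvMaxc_nonneg (q : List (List Int)) : 0 ≤ pvMaxc q :=
  (PySem.List.le_foldl_max (q.map pvCnt) 0).1

theorem pvMaxc_le (q : List (List Int)) {r : List Int} (hr : r ∈ q) : pvCnt r ≤ pvMaxc q :=
  (PySem.List.le_foldl_max (q.map pvCnt) 0).2 _ (List.mem_map_of_mem hr)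

theorem pvMaxc_append (q : List (List Int)) (r : List Int) :
    pvMaxc (q ++ [r]) = max (pvMaxc q) (pvCnt r) := by
  simp [pvMaxc, List.foldl_append]

theorem pvLoop (m : List (List Int)) :
    ∀ (s p : List (List Int)), m = p ++ s →
    s.foldl
      (fun (st : Int × Option Int) row =>
        let pos_count := row.foldl (fun c item => if item > 0 then c + 1 else c) (0 : Int)
        if pos_count > st.1 then
          (pos_count, (PySem.List.index? m row).map (fun n => (n : Int)))
        else st)
      (pvState m p) = pvState m m := by
  intro s
  induction s with
  | nil => intro p hp; simp at hp; simp [hp]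
  | cons row s' ih =>
    intro p hp
    have hc : row.foldl (fun c item => if item > 0 then c + 1 else c) (0 : Int) = pvCnt row := by
      simpa using pvCnt_foldl row 0
    have hstep :
        (let pos_count := row.foldl (fun c item => if item > 0 then c + 1 else c) (0 : Int)
         if pos_count > (pvState m p).1 then
           (pos_count, (PySem.List.index? m row).map (fun n => (n : Int)))
         else pvState m p) = pvState m (p ++ [row]) := by
      simp only [hc, pvState]
      by_cases h : pvCnt row > pvMaxc p
      · have hmax : pvMaxc (p ++ [row]) = pvCnt row := by
          rw [pvMaxc_append]; exact max_eq_right h.le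
        have hpos : pvCnt row ≠ 0 := by
          have := pvMaxc_nonneg p; omega
        have hnot : ∀ r ∈ p, r ≠ row := by
          intro r hr he
          have := pvMaxc_le p hr
          rw [he] at this; omega
        have hidx : PySem.List.index? m row = some p.length := by
          rw [PySem.List.index?_eq_some_iff]
          exact ⟨p, s', hp, rfl, fun hmem => (hnot row hmem) rfl⟩
        have hnotc : (pvCnt row) ∉ p.map pvCnt := by
          intro hmem
          rcases List.mem_map.1 hmem with ⟨r, hr, he⟩
          have := pvMaxc_le p hr; omega
        have hidx2 : PySem.List.index? (m.map pvCnt) (pvCnt row) = some p.length := by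
          rw [PySem.List.index?_eq_some_iff]
          refine ⟨p.map pvCnt, s'.map pvCnt, ?_, by simp, hnotc⟩
          simp [hp]
        simp only [PySem.List.index?_eq_idxOf?] at hidx hidx2
        simp [h, hmax, hpos, hidx, hidx2]
      · have hmax : pvMaxc (p ++ [row]) = pvMaxc p := by
          rw [pvMaxc_append]; exact max_eq_left (by omega)
        simp [h, hmax]
    rw [List.foldl_cons, hstep]
    exact ih (p ++ [row]) (by simp [hp])

theorem pvA_eq (m : List (List Int)) :
    getRowIndexWithMostPositiveNumbers m =
      (if pvMaxc m = 0 then none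
       else (PySem.List.index? (m.map pvCnt) (pvMaxc m)).map (fun n => (n : Int))) := by
  have h0 : pvState m ([] : List (List Int)) = (0, none) := by simp [pvState, pvMaxc]
  have := pvLoop m m [] (by simp)
  rw [h0] at this
  unfold getRowIndexWithMostPositiveNumbers
  rw [this]
  rfl

-- ===== VERDICT (by name: the statement is the Claim_ definition above) =====
theorem getRowIndexWithMostPositiveNumbers_spec : Claim_equal_getRowIndexWithMostPositiveNumbers := by
  intro m _
  show getRowIndexWithMostPositiveNumbers m = getRowIndexWithMostPositiveNumbers_alt m
  rw [pvA_eq]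
  unfold getRowIndexWithMostPositiveNumbers_alt
  cases m with
  | nil => simp [pvMaxc, PySem.List.max?]
  | cons r t =>
    have hmx : pvMaxc (r :: t) = (t.map pvCnt).foldl max (pvCnt r) := by
      have h1 : pvMaxc (r :: t) = (t.map pvCnt).foldl max (max 0 (pvCnt r)) := by
        simp [pvMaxc]
      rw [h1, max_eq_right (pvCnt_nonneg r)]
    show _ = (match PySem.List.max? ((r :: t).map (fun (row : List Int) => ((row.filter (fun x => decide (x > 0))).length : Int))) (fun x => x) with
      | none => none
      | some mv => if mv = 0 then none
          else (PySem.List.index? ((r :: t).map (fun (row : List Int) => ((row.filter (fun x => decide (x > 0))).length : Int))) mv).map (fun n => (n : Int)))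
    have hcons : (r :: t).map (fun (row : List Int) => ((row.filter (fun x => decide (x > 0))).length : Int))
        = pvCnt r :: t.map pvCnt := by simp [pvCnt]
    rw [hcons, PySem.List.max?_id_cons, ← hmx]
    have : (r :: t).map pvCnt = pvCnt r :: t.map pvCnt := by simp
    rw [← this]
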